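-- pv_equiv track=rewrite | github.com/dbanaszak1/KAL | 3/3_all.py | iloczyn
-- ===== SOURCE A (Python) =====
-- def iloczyn(a, b):
--     result = 0
--     for _ in range(8):
--         if b & 1:
--             result ^= a
--         a <<= 1
--         if a & 0b1_0000_0000:
--             a ^= 0b1_0001_1011
--         a &= 0b1111_1111
--         b >>= 1
--     return result
-- ===== SOURCE B (Python) =====
-- def iloczyn(a, b):
--     # MSB-first Horner scheme: recurse to the top bit of b, then on the way
--     # back double (xtime) the accumulator and XOR in a where b has a set bit.
--     def go(i):
--         if i == 8:
--             return 0
--         r = go(i + 1) << 1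
--         if r & 0x100:
--             r ^= 0x11b
--         r &= 0xff
--         if (b >> i) & 1:
--             r ^= a
--         return r
--     return go(0)
-- ===== Notes on version B (the rewrite author's own statement) =====
-- stated objective: alternative
-- what changed: A multiplies LSB-first by mutating state: it doubles the multiplicand a each step and shifts b down, XOR-accumulating into result; B is a recursive MSB-first Horner scheme that leaves a and b untouched and instead doubles the accumulator in GF(2^8) on the way back from the recursion, XORing in a at each set bit of b.
import Mathlib
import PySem

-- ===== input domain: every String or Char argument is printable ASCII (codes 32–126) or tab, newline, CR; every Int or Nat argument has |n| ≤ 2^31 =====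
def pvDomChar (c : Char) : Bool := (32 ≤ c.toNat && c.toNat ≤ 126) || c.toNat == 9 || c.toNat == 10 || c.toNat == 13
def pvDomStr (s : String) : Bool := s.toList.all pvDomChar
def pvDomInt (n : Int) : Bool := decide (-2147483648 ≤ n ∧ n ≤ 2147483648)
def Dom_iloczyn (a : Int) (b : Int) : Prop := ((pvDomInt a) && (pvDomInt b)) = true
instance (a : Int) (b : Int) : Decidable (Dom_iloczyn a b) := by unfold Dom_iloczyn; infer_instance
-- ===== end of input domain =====

-- B replaces A's LSB-first loop (which doubles the multiplicand a and shifts b down)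
-- with an MSB-first recursive Horner scheme that doubles the accumulator instead;
-- alternative decomposition, same cost.


-- ===== PORT A =====
-- one iteration of A's loop body over the mutating state (result, a, b)
def iloczynStepA (s : Int × Int × Int) : Int × Int × Int :=
  match s with
  | (result, a, b) =>
    let result := if PySem.Int.band b 1 ≠ 0 then PySem.Int.bxor result a else result
    let a := a <<< (1 : Nat)
    let a := if PySem.Int.band a 256 ≠ 0 then PySem.Int.bxor a 283 else a
    let a := PySem.Int.band a 255
    (result, a, b >>> (1 : Nat))

def iloczyn (a : Int) (b : Int) : Int :=
  ((PySem.List.pyRange 0 8 1).foldl (fun s _ => iloczynStepA s) (0, a, b)).1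

-- ===== PORT B =====
-- Source B's inner recursion go(i); written with fuel k = 8 - i (go(8) = 0 is fuel 0),
-- so 'go (i+1)' is the recursive call at fuel k and bit i of b is bit 7 - k
def iloczynGo (a b : Int) : Nat → Int
  | 0 => 0
  | k+1 =>
    let r := iloczynGo a b k <<< (1 : Nat)
    let r := if PySem.Int.band r 256 ≠ 0 then PySem.Int.bxor r 283 else r
    let r := PySem.Int.band r 255
    if PySem.Int.band (b >>> (7 - k : Nat)) 1 ≠ 0 then PySem.Int.bxor r a else r

def iloczyn_alt (a : Int) (b : Int) : Int := iloczynGo a b 8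

-- ===== PRECONDITION & SPEC =====
def Spec_iloczyn (a : Int) (b : Int) (out : Int) : Prop := out = iloczyn_alt a b
instance (a : Int) (b : Int) (out : Int) : Decidable (Spec_iloczyn a b out) := by unfold Spec_iloczyn; infer_instance

-- ===== CLAIM (what is proved, stated in full; the proofs are below) =====
def Claim_equal_iloczyn : Prop := ∀ (a : Int) (b : Int), Dom_iloczyn a b → Spec_iloczyn a b (iloczyn a b)

-- ===== LEMMAS AND PROOFS =====
lemma nat_zero_ldiff (m : Nat) : Nat.ldiff 0 m = 0 := by
  apply Nat.zero_of_testBit_eq_false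
  intro i; simp [Nat.testBit_ldiff]

lemma nat_sub_and : ∀ c m : Nat, c - (c &&& m) = Nat.ldiff c m := by
  intro c
  induction c using Nat.binaryRec with
  | zero => intro m; simp [nat_zero_ldiff]
  | bit b c' ih =>
    intro m
    rw [← Nat.bit_testBit_zero_shiftRight_one m]
    rw [Nat.land_bit, Nat.ldiff_bit]
    have h1 := ih (m >>> 1)
    have h2 : c' &&& m >>> 1 ≤ c' := Nat.and_le_left
    simp only [Nat.bit_val]
    cases b <;> cases m.testBit 0 <;> simp at * <;> omega

lemma band_eq_land (x y : Int) : PySem.Int.band x y = Int.land x y := by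
  unfold PySem.Int.band
  rcases x with m|m <;> rcases y with n|n <;> simp [Int.land, nat_sub_and]
  · omega

lemma bxor_eq_lxor (x y : Int) : PySem.Int.bxor x y = Int.xor x y := by
  unfold PySem.Int.bxor
  rcases x with m|m <;> rcases y with n|n <;> simp [Int.xor] <;> omega

lemma int_ext {x y : Int} (h : ∀ k, x.testBit k = y.testBit k) : x = y := by
  rcases x with m|m <;> rcases y with n|n
  · simp only [Int.testBit] at h
    exact congrArg _ (Nat.eq_of_testBit_eq h)
  · exfalso
    obtain ⟨k, hk1, hk2⟩ : ∃ k, m < 2^k ∧ n < 2^k :=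
      ⟨m+n+1, lt_of_lt_of_le Nat.lt_two_pow_self (Nat.pow_le_pow_right (by norm_num) (by omega)),
        lt_of_lt_of_le Nat.lt_two_pow_self (Nat.pow_le_pow_right (by norm_num) (by omega))⟩
    have := h k
    simp only [Int.testBit] at this
    rw [Nat.testBit_eq_false_of_lt hk1, Nat.testBit_eq_false_of_lt hk2] at this
    simp at this
  · exfalso
    obtain ⟨k, hk1, hk2⟩ : ∃ k, m < 2^k ∧ n < 2^k :=
      ⟨m+n+1, lt_of_lt_of_le Nat.lt_two_pow_self (Nat.pow_le_pow_right (by norm_num) (by omega)),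
        lt_of_lt_of_le Nat.lt_two_pow_self (Nat.pow_le_pow_right (by norm_num) (by omega))⟩
    have := h k
    simp only [Int.testBit] at this
    rw [Nat.testBit_eq_false_of_lt hk1, Nat.testBit_eq_false_of_lt hk2] at this
    simp at this
  · simp only [Int.testBit] at h
    have hmn : ∀ k, m.testBit k = n.testBit k := by intro k; have := h k; simpa using this
    exact congrArg Int.negSucc (Nat.eq_of_testBit_eq hmn)

lemma shl_one (x : Int) : x <<< (1:Nat) = 2 * x := by
  rcases x with m|m
  · show (Int.ofNat (m <<< 1)) = _
    simp [Nat.shiftLeft_eq]; ring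
  · show (Int.negSucc (Nat.shiftLeft' true m 1)) = _
    simp [Nat.shiftLeft']
    omega

lemma testBit_two_mul (x : Int) (k : Nat) :
    (2 * x).testBit k = if k = 0 then false else x.testBit (k - 1) := by
  rcases x with m|m
  · have : (2 * Int.ofNat m) = Int.ofNat (2 * m) := by simp
    rw [this]
    cases k with
    | zero => simp [Int.testBit]
    | succ j => simp [Int.testBit, Nat.testBit_succ]
  · have : (2 * Int.negSucc m) = Int.negSucc (2 * m + 1) := by
      simp [Int.negSucc_eq]; ring
    rw [this]
    cases k with
    | zero => simp [Int.testBit]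
    | succ j => simp [Int.testBit, Nat.testBit_succ]; congr 1; omega

lemma testBit_bxor (x y : Int) (k : Nat) :
    (PySem.Int.bxor x y).testBit k = xor (x.testBit k) (y.testBit k) := by
  rw [bxor_eq_lxor]; exact Int.testBit_lxor x y k

lemma testBit_band (x y : Int) (k : Nat) :
    (PySem.Int.band x y).testBit k = (x.testBit k && y.testBit k) := by
  rw [band_eq_land]; exact Int.testBit_land x y k

lemma bxor_assoc (x y z : Int) :
    PySem.Int.bxor (PySem.Int.bxor x y) z = PySem.Int.bxor x (PySem.Int.bxor y z) := by
  apply int_ext; intro k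
  simp [testBit_bxor]

lemma zero_bxor (x : Int) : PySem.Int.bxor 0 x = x := by
  rw [PySem.Int.bxor_comm]; exact PySem.Int.bxor_zero x

lemma testBit_256 (k : Nat) : (256 : Int).testBit k = decide (8 = k) := by
  show (Int.ofNat 256).testBit k = _
  simp only [Int.testBit]
  have : (256:Nat) = 2^8 := by norm_num
  rw [this, Nat.testBit_two_pow]

lemma band_256_eq (u : Int) : PySem.Int.band u 256 = if u.testBit 8 = true then 256 else 0 := by
  apply int_ext; intro k
  simp only [testBit_band, testBit_256]
  split_ifs with h
  · rw [testBit_256]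
    rcases eq_or_ne (8:Nat) k with rfl|hk
    · simp [h]
    · simp [hk]
  · show _ = (0:Int).testBit k
    have h0 : (0:Int).testBit k = false := by simp [Int.testBit, Nat.zero_testBit]
    rw [h0]
    rcases eq_or_ne (8:Nat) k with rfl|hk
    · simp [Bool.eq_false_iff.mpr h]
    · simp [hk]

lemma band_256_ne_iff (u : Int) : PySem.Int.band u 256 ≠ 0 ↔ u.testBit 8 = true := by
  rw [band_256_eq]
  split_ifs with h <;> simp [h]

lemma two_mul_bxor (x y : Int) :
    2 * PySem.Int.bxor x y = PySem.Int.bxor (2 * x) (2 * y) := by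
  apply int_ext; intro k
  simp only [testBit_bxor, testBit_two_mul]
  split_ifs <;> simp

def xtimeI (x : Int) : Int :=
  let u := x <<< (1:Nat)
  let u := if PySem.Int.band u 256 ≠ 0 then PySem.Int.bxor u 283 else u
  PySem.Int.band u 255

lemma xtime_linear (x y : Int) :
    xtimeI (PySem.Int.bxor x y) = PySem.Int.bxor (xtimeI x) (xtimeI y) := by
  have hxy : PySem.Int.band (PySem.Int.bxor (2*x) (2*y)) 256 ≠ 0 ↔
      xor ((2*x).testBit 8) ((2*y).testBit 8) = true := by
    rw [band_256_ne_iff, testBit_bxor]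
  simp only [xtimeI, shl_one, two_mul_bxor]
  by_cases hx : (2*x).testBit 8 = true <;> by_cases hy : (2*y).testBit 8 = true
  · rw [if_pos ((band_256_ne_iff _).mpr hx), if_pos ((band_256_ne_iff _).mpr hy),
      if_neg (by rw [hxy, hx, hy]; simp)]
    apply int_ext; intro k
    simp only [testBit_band, testBit_bxor]
    cases (2*x).testBit k <;> cases (2*y).testBit k <;> cases (283:Int).testBit k <;>
      cases (255:Int).testBit k <;> rfl
  · rw [if_pos ((band_256_ne_iff _).mpr hx), if_neg (fun h => hy ((band_256_ne_iff _).mp h)),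
      if_pos (by rw [hxy, hx, Bool.eq_false_iff.mpr hy]; rfl)]
    apply int_ext; intro k
    simp only [testBit_band, testBit_bxor]
    cases (2*x).testBit k <;> cases (2*y).testBit k <;> cases (283:Int).testBit k <;>
      cases (255:Int).testBit k <;> rfl
  · rw [if_neg (fun h => hx ((band_256_ne_iff _).mp h)), if_pos ((band_256_ne_iff _).mpr hy),
      if_pos (by rw [hxy, hy, Bool.eq_false_iff.mpr hx]; rfl)]
    apply int_ext; intro k
    simp only [testBit_band, testBit_bxor]
    cases (2*x).testBit k <;> cases (2*y).testBit k <;> cases (283:Int).testBit k <;>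
      cases (255:Int).testBit k <;> rfl
  · rw [if_neg (fun h => hx ((band_256_ne_iff _).mp h)),
      if_neg (fun h => hy ((band_256_ne_iff _).mp h)),
      if_neg (by rw [hxy, Bool.eq_false_iff.mpr hx, Bool.eq_false_iff.mpr hy]; simp)]
    apply int_ext; intro k
    simp only [testBit_band, testBit_bxor]
    cases (2*x).testBit k <;> cases (2*y).testBit k <;> cases (255:Int).testBit k <;> rfl

-- proof-side view of A's fold
def loopA : Nat → (Int × Int × Int) → (Int × Int × Int)
  | 0, s => s
  | n+1, s => loopA n (iloczynStepA s)

-- the common reference value: XOR of the selected GF(2^8) doublings of a,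
-- consuming b LSB-first
def mulT : Nat → Int → Int → Int
  | 0, _, _ => 0
  | k+1, a, b =>
    PySem.Int.bxor (if PySem.Int.band b 1 ≠ 0 then a else 0)
      (mulT k (xtimeI a) (b >>> (1 : Nat)))

lemma pv_shr_shr (b : Int) (m n : Nat) : (b >>> m) >>> n = b >>> (m + n) := by
  simp [Int.shiftRight_eq_div_pow, pow_add, Int.ediv_ediv_of_nonneg]

lemma pv_shr_zero (b : Int) : b >>> (0 : Nat) = b := by
  cases b <;> rfl

lemma xtimeI_zero : xtimeI 0 = 0 := by decide

lemma stepA_eq (r a b : Int) :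
    iloczynStepA (r, a, b) =
      (if PySem.Int.band b 1 ≠ 0 then PySem.Int.bxor r a else r, xtimeI a, b >>> (1 : Nat)) := rfl

lemma iloczyn_eq_loopA (a b : Int) : iloczyn a b = (loopA 8 (0, a, b)).1 := by
  have h : PySem.List.pyRange 0 8 1 = [0, 1, 2, 3, 4, 5, 6, 7] := by decide
  simp only [iloczyn, h, List.foldl, loopA]

lemma loopA_eq (k : Nat) : ∀ (r a b : Int),
    (loopA k (r, a, b)).1 = PySem.Int.bxor r (mulT k a b) := by
  induction k with
  | zero => intro r a b; simp [loopA, mulT, PySem.Int.bxor_zero]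
  | succ k ih =>
    intro r a b
    show (loopA k (iloczynStepA (r, a, b))).1 = _
    rw [stepA_eq]
    rw [ih]
    show _ = PySem.Int.bxor r (mulT (k+1) a b)
    simp only [mulT]
    by_cases hb : PySem.Int.band b 1 ≠ 0
    · rw [if_pos hb, if_pos hb, bxor_assoc]
    · rw [if_neg hb, if_neg hb, zero_bxor]

lemma mulT_xtime (k : Nat) : ∀ (a c : Int),
    mulT k (xtimeI a) c = xtimeI (mulT k a c) := by
  induction k with
  | zero => intro a c; simp [mulT, xtimeI_zero]
  | succ k ih =>
    intro a c
    simp only [mulT]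
    rw [ih (xtimeI a), ih a, xtime_linear]
    by_cases hb : PySem.Int.band c 1 ≠ 0
    · rw [if_pos hb, if_pos hb]
    · rw [if_neg hb, if_neg hb, xtimeI_zero]

lemma go_eq (a b : Int) : ∀ (k : Nat), k ≤ 8 →
    iloczynGo a b k = mulT k a (b >>> (8 - k : Nat)) := by
  intro k
  induction k with
  | zero => intro _; simp [iloczynGo, mulT]
  | succ k ih =>
    intro hk
    have hk7 : k ≤ 7 := by omega
    show (let r := iloczynGo a b k <<< (1 : Nat)
          let r := if PySem.Int.band r 256 ≠ 0 then PySem.Int.bxor r 283 else r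
          let r := PySem.Int.band r 255
          if PySem.Int.band (b >>> (7 - k : Nat)) 1 ≠ 0 then PySem.Int.bxor r a else r) = _
    show (if PySem.Int.band (b >>> (7 - k : Nat)) 1 ≠ 0
          then PySem.Int.bxor (xtimeI (iloczynGo a b k)) a
          else xtimeI (iloczynGo a b k)) = _
    rw [ih (by omega)]
    have hshift : (b >>> (7 - k : Nat)) >>> (1 : Nat) = b >>> (8 - k : Nat) := by
      rw [pv_shr_shr]
      congr 1
      omega
    have h8 : (8 - (k + 1) : Nat) = (7 - k : Nat) := by omega
    rw [h8]
    show _ = mulT (k+1) a (b >>> (7 - k : Nat))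
    simp only [mulT, hshift, mulT_xtime]
    by_cases hb : PySem.Int.band (b >>> (7 - k : Nat)) 1 ≠ 0
    · rw [if_pos hb, if_pos hb, PySem.Int.bxor_comm]
    · rw [if_neg hb, if_neg hb, zero_bxor]

-- ===== VERDICT (by name: the statement is the Claim_ definition above) =====
theorem iloczyn_spec : Claim_equal_iloczyn := by
  intro a b _
  show iloczyn a b = iloczyn_alt a b
  rw [iloczyn_eq_loopA, loopA_eq, zero_bxor, iloczyn_alt, go_eq a b 8 (by omega)]
  norm_num [pv_shr_zero]
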